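-- pv_equiv track=rewrite | github.com/krankydonkey/greedyboi | Dice.py | greater_rolls
-- ===== SOURCE A (Python) =====
-- def greater_rolls(n, state, upper, other=None):
--     other = [] if other is None else other
--     if not upper:
--         if all(i == 1 for i in other):
--             return []
--         else:
--             return [other]
--     else:
--         rolls = []
--         start = max(n - sum(state) - sum(upper[1:]), 0) + state[0]
--         stop = min(n - sum(state) + 1, upper[0]) + state[0]
--         for i in range(start, stop):
--             rolls += greater_rolls(n - i, state[1:], upper[1:], other + [i])
--         return rolls
-- ===== SOURCE B (Python) =====
-- def greater_rolls(n, state, upper, other=None):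
--     # suffix-sum tables: ssuf[k] = sum(state[k:]), usuf[k] = sum(upper[k:])
--     ssuf = [0] * (len(state) + 1)
--     for k in range(len(state) - 1, -1, -1):
--         ssuf[k] = ssuf[k + 1] + state[k]
--     usuf = [0] * (len(upper) + 1)
--     for k in range(len(upper) - 1, -1, -1):
--         usuf[k] = usuf[k + 1] + upper[k]
--     # iterative level-by-level expansion of a frontier of (prefix, remaining n) pairs
--     frontier = [(([] if other is None else other), n)]
--     for k in range(len(upper)):
--         s0 = state[k]
--         new = []
--         for prefix, m in frontier:
--             start = max(m - ssuf[k] - usuf[k + 1], 0) + s0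
--             stop = min(m - ssuf[k] + 1, upper[k]) + s0
--             new += [(prefix + [i], m - i) for i in range(start, stop)]
--         frontier = new
--     return [p for p, m in frontier if any(i != 1 for i in p)]
-- ===== Notes on version B (the rewrite author's own statement) =====
-- stated objective: alternative
-- what changed: Replaces A's depth-first recursion (which re-computes sum(state) and sum(upper[1:]) at every node and concatenates child result lists) by an iterative level-by-level (breadth-first) expansion of a frontier of (prefix, remaining-n) pairs, with both suffix-sum tables precomputed once, filtering the all-ones leaves in a single final pass; leaves of the fixed-depth tree appear in the same left-to-right order.
-- outside the precondition, e.g. on greater_rolls(100, [0], [3, 3], None): A returns [], B raises IndexError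
import Mathlib
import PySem

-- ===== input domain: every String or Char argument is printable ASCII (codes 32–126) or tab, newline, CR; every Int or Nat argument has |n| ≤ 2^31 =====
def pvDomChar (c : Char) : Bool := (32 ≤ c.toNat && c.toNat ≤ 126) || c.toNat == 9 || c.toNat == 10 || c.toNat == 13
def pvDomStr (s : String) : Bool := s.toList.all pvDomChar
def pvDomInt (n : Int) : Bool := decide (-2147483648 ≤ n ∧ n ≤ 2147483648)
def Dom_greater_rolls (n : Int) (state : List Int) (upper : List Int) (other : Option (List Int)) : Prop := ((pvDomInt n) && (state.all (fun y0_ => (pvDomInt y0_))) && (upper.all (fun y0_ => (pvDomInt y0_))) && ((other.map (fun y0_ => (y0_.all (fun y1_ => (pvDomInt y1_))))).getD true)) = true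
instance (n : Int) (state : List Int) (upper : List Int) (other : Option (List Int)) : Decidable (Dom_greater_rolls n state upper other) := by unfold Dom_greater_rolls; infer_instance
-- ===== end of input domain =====

-- B rewrites A's depth-first recursion as an iterative level-by-level frontier expansion
-- (alternative decomposition, same cost class); equivalence is about the return value only.

-- ===== PORT A =====
def greater_rolls (n : Int) (state : List Int) (upper : List Int) (other : Option (List Int)) : List (List Int) :=
  let oth := other.getD []
  match upper with
  | [] => if oth.all (fun i => i == 1) then [] else [oth]
  | u0 :: urest =>
    match state with
    | [] => []  -- Python raises IndexError on state[0] here; excluded by Pre_greater_rolls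
    | s0 :: srest =>
      let start := max (n - (s0 :: srest).sum - urest.sum) 0 + s0
      let stop := min (n - (s0 :: srest).sum + 1) u0 + s0
      (PySem.List.pyRange start stop 1).foldl
        (fun rolls i => rolls ++ greater_rolls (n - i) srest urest (some (oth ++ [i]))) []
termination_by upper

-- ===== PORT B =====
-- the backward fill of the suffix-sum tables (ssuf[k] = sum(state[k:])) is ported as the
-- right-to-left recursion producing the same list
def pvSufSums (xs : List Int) : List Int :=
  match xs with
  | [] => [0]
  | x :: t => let r := pvSufSums t; (x + r.headD 0) :: r

def greater_rolls_alt (n : Int) (state : List Int) (upper : List Int) (other : Option (List Int)) : List (List Int) :=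
  let ssuf := pvSufSums state
  let usuf := pvSufSums upper
  let init : List (List Int × Int) := [(other.getD [], n)]
  let frontier := (List.range upper.length).foldl (fun frontier k =>
      match state.drop k with
      | [] => frontier  -- Python raises IndexError on state[k] here; excluded by Pre_greater_rolls
      | s0 :: _ =>
        frontier.foldl (fun acc pm =>
          acc ++ (PySem.List.pyRange (max (pm.2 - ssuf.getD k 0 - usuf.getD (k + 1) 0) 0 + s0)
                    (min (pm.2 - ssuf.getD k 0 + 1) (upper.getD k 0) + s0) 1).map
                   (fun i => (pm.1 ++ [i], pm.2 - i))) []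
      ) init
  (frontier.filter (fun pm => pm.1.any (fun i => i != 1))).map (fun pm => pm.1)

-- ===== PRECONDITION & SPEC =====
-- Pre_ excludes upper longer than state, the shape outside the natural domain of one state
-- entry per die: there A's state[0] raises IndexError whenever the enumeration reaches the
-- missing entry (and returns [] only when an earlier range is empty), while B's level loop
-- always reaches state[k] and raises IndexError.
def Pre_greater_rolls (n : Int) (state : List Int) (upper : List Int) (other : Option (List Int)) : Prop :=
  upper.length ≤ state.length
instance (n : Int) (state : List Int) (upper : List Int) (other : Option (List Int)) : Decidable (Pre_greater_rolls n state upper other) := by unfold Pre_greater_rolls; infer_instance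

def pvWitness_greater_rolls : Int × List Int × List Int × Option (List Int) := (6, [0, 0], [3, 3], none)

def Spec_greater_rolls (n : Int) (state : List Int) (upper : List Int) (other : Option (List Int)) (out : List (List Int)) : Prop := out = greater_rolls_alt n state upper other
instance (n : Int) (state : List Int) (upper : List Int) (other : Option (List Int)) (out : List (List Int)) : Decidable (Spec_greater_rolls n state upper other out) := by unfold Spec_greater_rolls; infer_instance

-- ===== CLAIM (what is proved, stated in full; the proofs are below) =====
def Claim_equal_greater_rolls : Prop := ∀ (n : Int) (state : List Int) (upper : List Int) (other : Option (List Int)), Dom_greater_rolls n state upper other → Pre_greater_rolls n state upper other → Spec_greater_rolls n state upper other (greater_rolls n state upper other)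

-- ===== LEMMAS AND PROOFS =====

-- the tree of (full prefix, remaining n) leaves, shared reference for both proofs
def pvFrames (n : Int) (state : List Int) (upper : List Int) (p : List Int) : List (List Int × Int) :=
  match upper, state with
  | [], _ => [(p, n)]
  | u0 :: urest, s0 :: srest =>
    (PySem.List.pyRange (max (n - (s0 :: srest).sum - urest.sum) 0 + s0)
        (min (n - (s0 :: srest).sum + 1) u0 + s0) 1).flatMap
      (fun i => pvFrames (n - i) srest urest (p ++ [i]))
  | _ :: _, [] => []
termination_by upper

theorem pv_filtmap_flatMap {α β γ : Type} (l : List α) (f : α → List β) (q : β → Bool) (g : β → γ) :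
    ((l.flatMap f).filter q).map g = l.flatMap (fun x => ((f x).filter q).map g) := by
  induction l with
  | nil => rfl
  | cons a t ih => simp [List.flatMap_cons, List.filter_append, List.map_append, ih]

theorem pv_A_frames (upper : List Int) : ∀ (n : Int) (state : List Int) (other : Option (List Int)),
    upper.length ≤ state.length →
    greater_rolls n state upper other
      = ((pvFrames n state upper (other.getD [])).filter (fun pm => pm.1.any (fun i => i != 1))).map (fun pm => pm.1) := by
  induction upper with
  | nil =>
    intro n state other _
    simp only [greater_rolls, pvFrames]
    by_cases h : (other.getD []).all (fun i => i == 1)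
    · have : ¬ ((other.getD []).any (fun i => i != 1) = true) := by
        simp only [List.any_eq_true, bne_iff_ne]
        simp only [List.all_eq_true, beq_iff_eq] at h
        rintro ⟨x, hx, hne⟩; exact hne (h x hx)
      simp [h, List.filter, this]
    · have : (other.getD []).any (fun i => i != 1) = true := by
        simp only [List.any_eq_true, bne_iff_ne]
        simp only [List.all_eq_true, beq_iff_eq, not_forall] at h
        obtain ⟨x, hx, hne⟩ := h; exact ⟨x, hx, hne⟩
      simp [h, List.filter, this]
  | cons u0 urest ih =>
    intro n state other hlen
    cases state with
    | nil => simp at hlen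
    | cons s0 srest =>
      simp only [greater_rolls, pvFrames]
      rw [PySem.List.foldl_append_eq_flatMap, List.nil_append, pv_filtmap_flatMap]
      apply List.flatMap_congr
      intro i _
      exact ih (n - i) srest (some ((other.getD []) ++ [i])) (by simpa using Nat.le_of_succ_le_succ hlen)

-- one B level-step, named for the proof
def pvStep (state upper ssuf usuf : List Int) (frontier : List (List Int × Int)) (k : Nat) : List (List Int × Int) :=
  match state.drop k with
  | [] => frontier
  | s0 :: _ =>
    frontier.foldl (fun acc pm =>
      acc ++ (PySem.List.pyRange (max (pm.2 - ssuf.getD k 0 - usuf.getD (k + 1) 0) 0 + s0)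
                (min (pm.2 - ssuf.getD k 0 + 1) (upper.getD k 0) + s0) 1).map
               (fun i => (pm.1 ++ [i], pm.2 - i))) []

theorem pvSufSums_headD (xs : List Int) : (pvSufSums xs).headD 0 = xs.sum := by
  induction xs with
  | nil => rfl
  | cons x t ih => simp only [pvSufSums, List.headD_cons]; rw [ih]; simp

theorem pvSufSums_getElem0 (xs : List Int) : (pvSufSums xs)[0]?.getD 0 = xs.sum := by
  have h := pvSufSums_headD xs
  cases hx : pvSufSums xs with
  | nil => rw [hx] at h; simpa using h
  | cons a l => rw [hx] at h; simpa using h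

theorem pv_B_levels (upper : List Int) : ∀ (state : List Int) (frontier : List (List Int × Int)),
    upper.length ≤ state.length →
    (List.range upper.length).foldl (pvStep state upper (pvSufSums state) (pvSufSums upper)) frontier
      = frontier.flatMap (fun pm => pvFrames pm.2 state upper pm.1) := by
  induction upper with
  | nil => intro state frontier _; simp [pvFrames]
  | cons u0 urest ih =>
    intro state frontier hlen
    cases state with
    | nil => simp at hlen
    | cons s0 srest =>
      rw [List.length_cons, List.range_succ_eq_map, List.foldl_cons, List.foldl_map]
      have hstep : (fun (fr : List (List Int × Int)) (k : Nat) =>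
            pvStep (s0 :: srest) (u0 :: urest) (pvSufSums (s0 :: srest)) (pvSufSums (u0 :: urest)) fr (k + 1))
          = pvStep srest urest (pvSufSums srest) (pvSufSums urest) := by
        funext fr k; simp [pvStep, pvSufSums]
      rw [hstep, ih srest _ (Nat.le_of_succ_le_succ hlen)]
      have hstep0 : pvStep (s0 :: srest) (u0 :: urest) (pvSufSums (s0 :: srest)) (pvSufSums (u0 :: urest)) frontier 0
          = frontier.flatMap (fun pm =>
              (PySem.List.pyRange (max (pm.2 - (s0 :: srest).sum - urest.sum) 0 + s0)
                  (min (pm.2 - (s0 :: srest).sum + 1) u0 + s0) 1).map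
                (fun i => (pm.1 ++ [i], pm.2 - i))) := by
        simp only [pvStep, pvSufSums, List.drop_zero, List.getD_cons_zero, List.getD_cons_succ,
          pvSufSums_headD]
        rw [PySem.List.foldl_append_eq_flatMap, List.nil_append]
        simp [List.sum_cons, pvSufSums_getElem0]
      rw [hstep0, List.flatMap_assoc]
      apply List.flatMap_congr
      intro pm _
      rw [List.flatMap_map]
      simp [pvFrames]

theorem pv_alt_frames (n : Int) (state upper : List Int) (other : Option (List Int))
    (h : upper.length ≤ state.length) :
    greater_rolls_alt n state upper other
      = ((pvFrames n state upper (other.getD [])).filter (fun pm => pm.1.any (fun i => i != 1))).map (fun pm => pm.1) := by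
  show ((((List.range upper.length).foldl
      (pvStep state upper (pvSufSums state) (pvSufSums upper)) [(other.getD [], n)]).filter
      (fun pm => pm.1.any (fun i => i != 1))).map (fun pm => pm.1)) = _
  rw [pv_B_levels upper state _ h]
  simp [List.flatMap_cons]

-- ===== VERDICT (by name: the statement is the Claim_ definition above) =====
theorem greater_rolls_spec : Claim_equal_greater_rolls := by
  intro n state upper other _ hpre
  unfold Spec_greater_rolls
  rw [pv_A_frames upper n state other hpre, pv_alt_frames n state upper other hpre]
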